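-- pv_equiv track=rewrite | github.com/sza86/Nice_It4WiFi | const.py | decode_allowed_t4
-- ===== SOURCE A (Python) =====
-- T4_ALLOWED_BIT_ORDER: tuple[str | None, ...] = (
--     None,
--     "MDAx",
--     "MDAy",
--     "MDAz",
--     "MDA0",
--     "MDA1",
--     "MDA2",
--     "MDA3",
--     "MDBi",
--     "MDBj",
--     "MDBk",
--     "MDBl",
--     "MDBm",
--     "MDEw",
--     "MDEx",
--     "MDEy",
--     "MDEz",
--     "MDE0",
--     "MDE1",
--     "MDE2",
--     "MDE3",
--     "MDE4",
--     "MDE5",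
--     "MDFh",
-- )
--
-- def decode_allowed_t4(mask_hex: str | None) -> list[str]:
--     if not mask_hex:
--         return []
--     try:
--         mask = int(mask_hex, 16)
--     except ValueError:
--         return []
--     allowed: list[str] = []
--     for bit_index, code in enumerate(T4_ALLOWED_BIT_ORDER):
--         if code is None:
--             continue
--         if mask & (1 << bit_index):
--             allowed.append(code)
--     return allowed
-- ===== SOURCE B (Python) =====
-- T4_ALLOWED_BIT_ORDER: tuple[str | None, ...] = (
--     None,
--     "MDAx",
--     "MDAy",
--     "MDAz",
--     "MDA0",
--     "MDA1",
--     "MDA2",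
--     "MDA3",
--     "MDBi",
--     "MDBj",
--     "MDBk",
--     "MDBl",
--     "MDBm",
--     "MDEw",
--     "MDEx",
--     "MDEy",
--     "MDEz",
--     "MDE0",
--     "MDE1",
--     "MDE2",
--     "MDE3",
--     "MDE4",
--     "MDE5",
--     "MDFh",
-- )
--
-- def decode_allowed_t4(mask_hex: str | None) -> list[str]:
--     if not mask_hex:
--         return []
--     try:
--         mask = int(mask_hex, 16)
--     except ValueError:
--         return []
--     # only bits 0..23 carry meaning; reduce to them (two's complement low bits)
--     mask &= (1 << len(T4_ALLOWED_BIT_ORDER)) - 1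
--     allowed: list[str] = []
--     while mask:
--         rest = mask & (mask - 1)          # clear the lowest set bit
--         code = T4_ALLOWED_BIT_ORDER[(mask ^ rest).bit_length() - 1]
--         if code is not None:
--             allowed.append(code)
--         mask = rest
--     return allowed
-- ===== Notes on version B (the rewrite author's own statement) =====
-- stated objective: alternative
-- what changed: Instead of scanning all 24 table positions, B masks the parsed value to the table's 24 bits and walks only the set bits in ascending order (clearing the lowest set bit each round, indexing the table by its bit position).
import Mathlib
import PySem

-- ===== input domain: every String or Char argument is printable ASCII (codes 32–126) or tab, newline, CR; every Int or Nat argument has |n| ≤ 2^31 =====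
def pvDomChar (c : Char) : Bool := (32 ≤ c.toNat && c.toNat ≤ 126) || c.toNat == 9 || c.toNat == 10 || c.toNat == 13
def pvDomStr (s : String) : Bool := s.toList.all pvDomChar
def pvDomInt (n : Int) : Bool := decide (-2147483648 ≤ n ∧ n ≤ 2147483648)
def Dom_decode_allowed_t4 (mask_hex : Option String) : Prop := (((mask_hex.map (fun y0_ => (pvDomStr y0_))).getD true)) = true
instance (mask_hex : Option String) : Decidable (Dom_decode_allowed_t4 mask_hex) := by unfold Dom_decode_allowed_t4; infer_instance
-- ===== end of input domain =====

-- B walks only the set bits of the mask (lowest-bit clearing) instead of scanning all 24 table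
-- positions; an alternative algorithm of similar cost, proved to return the same list.


-- T4_ALLOWED_BIT_ORDER (shared module constant)
def pvT4Table : List (Option String) :=
  [none, some "MDAx", some "MDAy", some "MDAz", some "MDA0", some "MDA1", some "MDA2",
   some "MDA3", some "MDBi", some "MDBj", some "MDBk", some "MDBl", some "MDBm", some "MDEw",
   some "MDEx", some "MDEy", some "MDEz", some "MDE0", some "MDE1", some "MDE2", some "MDE3",
   some "MDE4", some "MDE5", some "MDFh"]

-- ===== PORT A =====
-- loop body: `if code is None: continue; if mask & (1 << bit_index): allowed.append(code)`
-- (enumerate indices are ≥ 0, so `.toNat` on the index is exact)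
def pvAStep (mask : Int) (acc : List String) (p : Int × Option String) : List String :=
  match p.2 with
  | none => acc
  | some code => if PySem.Int.band mask ((1 : Int) <<< p.1.toNat) ≠ 0 then acc ++ [code] else acc

def decode_allowed_t4 (mask_hex : Option String) : List String :=
  match mask_hex with
  | none => []                                  -- `if not mask_hex`
  | some s =>
    if s.toList = [] then []                    -- empty string is falsy
    else
      match PySem.Int.ofStrBase? s 16 with      -- int(mask_hex, 16)
      | none => []                              -- except ValueError: return []
      | some mask => (PySem.List.enumerate pvT4Table).foldl (pvAStep mask) []

-- ===== PORT B =====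
-- `code = T4_ALLOWED_BIT_ORDER[idx]; if code is not None: append` — after the 24-bit masking the
-- index is always in range, so the out-of-range arm of pyGet? is unreachable on reachable calls
def pvEntry (idx : Nat) : List String :=
  match PySem.List.pyGet? pvT4Table (idx : Int) with
  | some (some code) => [code]
  | _ => []

-- `while mask: rest = mask & (mask-1); idx = (mask ^ rest).bit_length() - 1; …; mask = rest`
def pvBitWalk (mask : Nat) (acc : List String) : List String :=
  if hz : mask = 0 then acc
  else
    let rest := mask &&& (mask - 1)
    pvBitWalk rest (acc ++ pvEntry (PySem.Int.bitLength ((mask ^^^ rest : Nat) : Int) - 1))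
termination_by mask
decreasing_by
  have h1 : mask &&& (mask - 1) ≤ mask - 1 := Nat.and_le_right
  omega

def decode_allowed_t4_alt (mask_hex : Option String) : List String :=
  match mask_hex with
  | none => []
  | some s =>
    if s.toList = [] then []
    else
      match PySem.Int.ofStrBase? s 16 with
      | none => []
      | some mask =>
        -- mask &= (1 << len(T4_ALLOWED_BIT_ORDER)) - 1 ; the result is ≥ 0, so `.toNat` is exact
        pvBitWalk (PySem.Int.band mask (((1 : Int) <<< pvT4Table.length) - 1)).toNat []

-- ===== PRECONDITION & SPEC =====
def Spec_decode_allowed_t4 (mask_hex : Option String) (out : List String) : Prop := out = decode_allowed_t4_alt mask_hex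
instance (mask_hex : Option String) (out : List String) : Decidable (Spec_decode_allowed_t4 mask_hex out) := by unfold Spec_decode_allowed_t4; infer_instance

-- ===== CLAIM (what is proved, stated in full; the proofs are below) =====
def Claim_equal_decode_allowed_t4 : Prop := ∀ (mask_hex : Option String), Dom_decode_allowed_t4 mask_hex → Spec_decode_allowed_t4 mask_hex (decode_allowed_t4 mask_hex)

-- ===== LEMMAS AND PROOFS =====

-- reference form: one entry per table cell, tested against bit i of nn
def pvG (nn : Nat) : List (Option String) → Nat → List String
  | [], _ => []
  | c :: t, i =>
    (match c with
     | some code => if nn.testBit i then [code] else []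
     | none => []) ++ pvG nn t (i + 1)

-- bit-by-bit consumption form, matching B's absolute indices
def pvFk (k n : Nat) : List String :=
  if n = 0 then [] else (if n % 2 = 1 then pvEntry k else []) ++ pvFk (k + 1) (n / 2)
termination_by n
decreasing_by omega

theorem pv_comp_testBit : ∀ (t k r : Nat), r < 2 ^ t → k < t →
    (2 ^ t - 1 - r).testBit k = !r.testBit k := by
  intro t
  induction t with
  | zero => intro k r _ hk; omega
  | succ t ih =>
    intro k r hr hk
    have hP : 1 ≤ 2 ^ t := Nat.one_le_two_pow
    have h2 : 2 ^ (t + 1) = 2 * 2 ^ t := by ring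
    cases k with
    | zero =>
      simp only [Nat.testBit_zero]
      have : (2 ^ (t + 1) - 1 - r) % 2 = 1 ↔ ¬ r % 2 = 1 := by omega
      by_cases hr2 : r % 2 = 1 <;> simp [*] <;> omega
    | succ k =>
      simp only [Nat.testBit_succ]
      have he : (2 ^ (t + 1) - 1 - r) / 2 = 2 ^ t - 1 - r / 2 := by omega
      rw [he, ih k (r / 2) (by omega) (by omega)]

theorem pv_band_mask (m : Int) : PySem.Int.band m 16777215 = m % 16777216 := by
  unfold PySem.Int.band
  have hand : ∀ x : Nat, x &&& 16777215 = x % 16777216 := fun x =>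
    Nat.and_two_pow_sub_one_eq_mod x 24
  have hand' : ∀ x : Nat, (16777215 : Nat) &&& x = x % 16777216 := fun x => by
    rw [Nat.land_comm]; exact hand x
  split
  · rw [if_pos (by omega)]
    rw [show ((16777215 : Int)).toNat = 16777215 from rfl, hand]
    omega
  · rw [if_pos (by omega)]
    rw [show ((16777215 : Int)).toNat = 16777215 from rfl, hand']
    omega

theorem pv_crux (m : Int) (k : Nat) (hk : k < 24) :
    (PySem.Int.band m ((1 : Int) <<< k) ≠ 0) ↔ ((m % 16777216).toNat.testBit k = true) := by
  have hsl : (1 : Int) <<< k = ((2 ^ k : Nat) : Int) := by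
    rw [Int.shiftLeft_eq]; push_cast; ring
  rw [hsl]
  have hnn : (m % 16777216).toNat < 2 ^ 24 := by omega
  by_cases hm : 0 ≤ m
  · rw [PySem.Int.band_of_nonneg hm (by positivity)]
    have h1 : ((2 ^ k : Nat) : Int).toNat = 2 ^ k := Int.toNat_natCast _
    rw [h1, Nat.and_two_pow]
    have h2 : (m % 16777216).toNat = m.toNat % 2 ^ 24 := by omega
    rw [h2, Nat.testBit_mod_two_pow]
    cases hb : m.toNat.testBit k <;> simp [hk]
  · -- m < 0 : band m b = b.toNat - (b.toNat &&& (-m-1).toNat)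
    set a : Nat := (-m - 1).toNat with ha
    have hma : m = -(a : Int) - 1 := by omega
    have hb0 : ¬ (0 ≤ m) := hm
    have hbv : PySem.Int.band m ((2 ^ k : Nat) : Int)
        = ((2 ^ k - (2 ^ k &&& a) : Nat) : Int) := by
      unfold PySem.Int.band
      rw [if_neg hb0, if_pos (by positivity)]
      rw [Int.toNat_natCast, ← ha]
    have hland : 2 ^ k &&& a = (a.testBit k).toNat * 2 ^ k := by
      rw [Nat.land_comm]; exact Nat.and_two_pow a k
    have hn : (m % 16777216).toNat = 2 ^ 24 - 1 - a % 2 ^ 24 := by omega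
    rw [hbv, hland, hn, pv_comp_testBit 24 k (a % 2 ^ 24) (by omega) hk,
        Nat.testBit_mod_two_pow]
    have hpk : 0 < 2 ^ k := Nat.two_pow_pos k
    cases hb : a.testBit k <;> simp [hk]

-- ===== A-side: the enumerate fold equals pvG =====
theorem pv_enumerate_cons {α : Type} (c : α) (t : List α) (i : Int) :
    PySem.List.enumerate (c :: t) i = (i, c) :: PySem.List.enumerate t (i + 1) := rfl

theorem pv_A_fold (m : Int) (nn : Nat) (hnn : nn = (m % 16777216).toNat) :
    ∀ (tbl : List (Option String)) (i : Nat) (acc : List String), i + tbl.length ≤ 24 →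
    (PySem.List.enumerate tbl (i : Int)).foldl (pvAStep m) acc = acc ++ pvG nn tbl i := by
  intro tbl
  induction tbl with
  | nil => intro i acc _; simp [PySem.List.enumerate, pvG]
  | cons c t ih =>
    intro i acc hlen
    have hi24 : i < 24 := by simp at hlen; omega
    have hlen' : (i + 1) + t.length ≤ 24 := by simp at hlen; omega
    have hi1 : ((i : Int) + 1) = ((i + 1 : Nat) : Int) := by push_cast; ring
    rw [pv_enumerate_cons, List.foldl_cons]
    cases c with
    | none =>
      have hstep : pvAStep m acc ((i : Int), none) = acc := rfl
      rw [hstep, hi1, ih (i + 1) acc hlen']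
      simp [pvG]
    | some code =>
      have htn : ((i : Int)).toNat = i := by omega
      by_cases hc : PySem.Int.band m ((1 : Int) <<< i) ≠ 0
      · have hstep : pvAStep m acc ((i : Int), some code) = acc ++ [code] := by
          simp only [pvAStep]; rw [htn, if_pos hc]
        have hbit : nn.testBit i = true := by rw [hnn]; exact (pv_crux m i hi24).mp hc
        rw [hstep, hi1, ih (i + 1) _ hlen']
        simp [pvG, hbit]
      · have hstep : pvAStep m acc ((i : Int), some code) = acc := by
          simp only [pvAStep]; rw [htn, if_neg hc]
        have hbit : nn.testBit i = false := by
          cases hb : nn.testBit i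
          · rfl
          · exact absurd ((pv_crux m i hi24).mpr (hnn ▸ hb)) hc
        rw [hstep, hi1, ih (i + 1) _ hlen']
        simp [pvG, hbit]

-- ===== B-side bit identities =====
theorem pv_and_odd (n : Nat) (h : n % 2 = 1) : n &&& (n - 1) = n - 1 := by
  apply Nat.eq_of_testBit_eq
  intro i
  rw [Nat.testBit_land]
  cases i with
  | zero => simp only [Nat.testBit_zero]; simp [h]
  | succ i =>
    simp only [Nat.testBit_succ]
    have : (n - 1) / 2 = n / 2 := by omega
    rw [this, Bool.and_self]

theorem pv_and_two_mul (a : Nat) :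
    (2 * a) &&& (2 * a - 1) = 2 * (a &&& (a - 1)) := by
  apply Nat.eq_of_testBit_eq
  intro i
  rw [Nat.testBit_land]
  cases i with
  | zero =>
    simp only [Nat.testBit_zero]
    simp [Nat.mul_mod_right]
  | succ i =>
    simp only [Nat.testBit_succ]
    have h1 : 2 * a / 2 = a := by omega
    have h2 : (2 * a - 1) / 2 = a - 1 := by omega
    have h3 : 2 * (a &&& (a - 1)) / 2 = a &&& (a - 1) := by omega
    rw [h1, h2, h3, Nat.testBit_land]

theorem pv_xor_odd (n : Nat) (h : n % 2 = 1) : n ^^^ (n - 1) = 1 := by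
  apply Nat.eq_of_testBit_eq
  intro i
  rw [Nat.testBit_xor]
  cases i with
  | zero =>
    simp only [Nat.testBit_zero]
    have h2 : ¬ ((n - 1) % 2 = 1) := by omega
    simp [h, h2]
  | succ i =>
    simp only [Nat.testBit_succ]
    have : (n - 1) / 2 = n / 2 := by omega
    rw [this, Bool.xor_self]
    have h1 : (1 : Nat) / 2 = 0 := by norm_num
    rw [h1]
    simp [Nat.zero_testBit]

theorem pv_xor_two_mul (a b : Nat) : (2 * a) ^^^ (2 * b) = 2 * (a ^^^ b) := by
  apply Nat.eq_of_testBit_eq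
  intro i
  rw [Nat.testBit_xor]
  cases i with
  | zero =>
    simp only [Nat.testBit_zero]
    simp [Nat.mul_mod_right]
  | succ i =>
    simp only [Nat.testBit_succ]
    have h1 : 2 * a / 2 = a := by omega
    have h2 : 2 * b / 2 = b := by omega
    have h3 : 2 * (a ^^^ b) / 2 = a ^^^ b := by omega
    rw [h1, h2, h3, Nat.testBit_xor]

theorem pv_L1 (n : Nat) (hn : n % 2 = 1) :
    ∀ k, (n * 2 ^ k) &&& (n * 2 ^ k - 1) = (n - 1) * 2 ^ k := by
  intro k
  induction k with
  | zero => simpa using pv_and_odd n hn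
  | succ k ih =>
    have h1 : n * 2 ^ (k + 1) = 2 * (n * 2 ^ k) := by ring
    have h2 : (n - 1) * 2 ^ (k + 1) = 2 * ((n - 1) * 2 ^ k) := by
      rw [pow_succ]; ring
    rw [h1, h2, pv_and_two_mul, ih]

theorem pv_L2 (n : Nat) (hn : n % 2 = 1) :
    ∀ k, (n * 2 ^ k) ^^^ ((n - 1) * 2 ^ k) = 2 ^ k := by
  intro k
  induction k with
  | zero => simpa using pv_xor_odd n hn
  | succ k ih =>
    have h1 : n * 2 ^ (k + 1) = 2 * (n * 2 ^ k) := by ring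
    have h2 : (n - 1) * 2 ^ (k + 1) = 2 * ((n - 1) * 2 ^ k) := by
      rw [pow_succ]; ring
    rw [h1, h2, pv_xor_two_mul, ih]
    ring

theorem pv_bitLength_pow (k : Nat) : PySem.Int.bitLength ((2 ^ k : Nat) : Int) = k + 1 := by
  induction k with
  | zero => decide
  | succ k ih =>
    rw [PySem.Int.bitLength_natCast (by positivity)]
    have : 2 ^ (k + 1) / 2 = 2 ^ k := by
      rw [pow_succ]; omega
    rw [this, ih]

theorem pv_walk_eq : ∀ (n : Nat), ∀ (k : Nat) (acc : List String),
    pvBitWalk (n * 2 ^ k) acc = acc ++ pvFk k n := by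
  intro n
  induction n using Nat.strong_induction_on with
  | _ n ih =>
    intro k acc
    by_cases h0 : n = 0
    · subst h0; rw [pvBitWalk, pvFk]; simp
    by_cases hpar : n % 2 = 1
    · -- odd: lowest set bit is at position k
      have hne : n * 2 ^ k ≠ 0 := Nat.mul_ne_zero h0 (Nat.two_pow_pos k).ne'
      rw [pvBitWalk, dif_neg hne]
      simp only [pv_L1 n hpar k, pv_L2 n hpar k, pv_bitLength_pow]
      have hrest : (n - 1) * 2 ^ k = (n / 2) * 2 ^ (k + 1) := by
        have : n - 1 = 2 * (n / 2) := by omega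
        rw [this]; ring
      rw [hrest, ih (n / 2) (by omega) (k + 1) _]
      conv_rhs => rw [pvFk]
      simp [h0, hpar]
    · -- even: shift the factorisation one position up
      have hev : n = (n / 2) * 2 := by omega
      have h1 : n * 2 ^ k = (n / 2) * 2 ^ (k + 1) := by
        conv_lhs => rw [hev]
        ring
      rw [h1, ih (n / 2) (by omega) (k + 1) acc]
      conv_rhs => rw [pvFk]
      simp [h0, hpar]

theorem pv_G_zero (nn : Nat) : ∀ (tbl : List (Option String)) (k : Nat),
    nn >>> k = 0 → pvG nn tbl k = [] := by
  intro tbl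
  induction tbl with
  | nil => intro k _; rfl
  | cons c t ih =>
    intro k hk
    have hb : nn.testBit k = false := by
      rw [show nn.testBit k = (nn >>> k).testBit 0 from by rw [Nat.testBit_shiftRight, Nat.add_zero], hk]
      exact Nat.zero_testBit 0
    have hk1 : nn >>> (k + 1) = 0 := by
      rw [Nat.shiftRight_succ, hk]
    simp only [pvG, ih (k + 1) hk1]
    cases c <;> simp [hb]

theorem pv_Fk_G (nn : Nat) (hnn : nn < 2 ^ 24) :
    ∀ (tbl : List (Option String)) (k : Nat) (n : Nat),
    pvT4Table.drop k = tbl → n = nn >>> k → pvFk k n = pvG nn tbl k := by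
  intro tbl
  induction tbl with
  | nil =>
    intro k n hdrop hn
    have hk24 : 24 ≤ k := by
      by_contra hlt
      have hklen : k < pvT4Table.length := by simp [pvT4Table]; omega
      have := List.drop_eq_nil_iff.mp hdrop
      simp [pvT4Table] at this
      omega
    have hz : n = 0 := by
      rw [hn, Nat.shiftRight_eq_div_pow]
      exact Nat.div_eq_of_lt
        (lt_of_lt_of_le hnn (Nat.pow_le_pow_right (by norm_num) hk24))
    subst hz
    rw [pvFk]
    simp [pvG]
  | cons c t ih =>
    intro k n hdrop hn
    have hget : pvT4Table[k]? = some c := by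
      have h0 : (List.drop k pvT4Table)[0]? = pvT4Table[k + 0]? := List.getElem?_drop
      rw [hdrop] at h0
      simpa using h0.symm
    have hbit : nn.testBit k = decide (n % 2 = 1) := by
      rw [hn, show nn.testBit k = (nn >>> k).testBit 0 from by rw [Nat.testBit_shiftRight, Nat.add_zero],
          Nat.testBit_zero]
    have htail : pvFk (k + 1) (n / 2) = pvG nn t (k + 1) := by
      apply ih
      · have h1 : List.drop 1 (List.drop k pvT4Table) = t := by rw [hdrop]; rfl
        rw [List.drop_drop] at h1
        rw [← h1]
      · rw [hn, Nat.shiftRight_succ]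
    by_cases h0 : n = 0
    · rw [pvFk, if_pos h0]
      exact (pv_G_zero nn (c :: t) k (by omega)).symm
    · rw [pvFk, if_neg h0]
      simp only [pvG, htail]
      cases c with
      | none =>
        have hentry : pvEntry k = [] := by
          unfold pvEntry
          rw [PySem.List.pyGet?_natCast, hget]
        by_cases hp : n % 2 = 1 <;> simp [hp, hentry]
      | some code =>
        have hentry : pvEntry k = [code] := by
          unfold pvEntry
          rw [PySem.List.pyGet?_natCast, hget]
        by_cases hp : n % 2 = 1
        · simp [hp, hentry, hbit]
        · simp [hp, hbit]

-- main pointwise equality for a parsed mask value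
theorem pv_main (m : Int) :
    (PySem.List.enumerate pvT4Table).foldl (pvAStep m) []
      = pvBitWalk (PySem.Int.band m (((1 : Int) <<< pvT4Table.length) - 1)).toNat [] := by
  have hmask : ((1 : Int) <<< pvT4Table.length) - 1 = 16777215 := by rfl
  rw [hmask, pv_band_mask]
  set nn : Nat := (m % 16777216).toNat with hnn
  have hlt : nn < 2 ^ 24 := by omega
  have hA := pv_A_fold m nn hnn pvT4Table 0 [] (by rfl)
  have hB : pvBitWalk nn [] = pvFk 0 nn := by
    have := pv_walk_eq nn 0 []
    simpa using this
  rw [hB, pv_Fk_G nn hlt pvT4Table 0 nn rfl (by simp)]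
  simpa using hA

-- ===== VERDICT (by name: the statement is the Claim_ definition above) =====
theorem decode_allowed_t4_spec : Claim_equal_decode_allowed_t4 := by
  intro mask_hex _
  unfold Spec_decode_allowed_t4 decode_allowed_t4 decode_allowed_t4_alt
  cases mask_hex with
  | none => rfl
  | some s =>
    by_cases hs : s.toList = []
    · simp [hs]
    · simp only [hs]
      cases hp : PySem.Int.ofStrBase? s 16 with
      | none => simp
      | some m => simp [pv_main m]
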